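-- pv_equiv track=rewrite | github.com/christakakis/graph_network_analysis | communityDetectionTechniques/communityDetectionTechniques.py | tn
-- ===== SOURCE A (Python) =====
-- def tn(groundTruthCommOfZeros,communities):
--   counter0=[]
--   counter1=[]
--   for community in communities:
--     count0=0
--     count1=0
--     for i in community:
--       if i in groundTruthCommOfZeros:
--          count0 +=1
--       else:
--          count1 +=1
--     counter0.append(count0)
--     counter1.append(count1)
--   true_negatives=0
--   # loop through each element in the list
--   for i in range(len(communities)):
--       for j in range(len(communities[i])):
--           product = communities[i][j]
--           # multiply the element with all other elements not on the same row and column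
--           for x in range(len(communities)):
--               for y in range(len(communities[x])):
--                   if x != i and y != j and x>i:
--                       true_negatives += product * communities[x][y]
--   return true_negatives
-- ===== SOURCE B (Python) =====
-- def tn(groundTruthCommOfZeros, communities):
--     # Column-aggregate closed form: total cross-pair product minus per-column dot products.
--     row_sums = [sum(row) for row in communities]
--     total = sum(row_sums)
--     pair_sum = (total * total - sum(s * s for s in row_sums)) // 2
--     maxlen = max((len(row) for row in communities), default=0)
--     dot_pairs = 0
--     for j in range(maxlen):
--         col = 0
--         sq = 0
--         for row in communities:
--             if j < len(row):
--                 v = row[j]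
--                 col += v
--                 sq += v * v
--         dot_pairs += (col * col - sq) // 2
--     return pair_sum - dot_pairs
-- ===== Notes on version B (the rewrite author's own statement) =====
-- stated objective: faster
-- what changed: Replaces A's quadruple nested loop over all element pairs by a closed form: half of (total-sum squared minus sum of squared row sums) minus, per column, half of (column-sum squared minus column sum of squares).
import Mathlib
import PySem

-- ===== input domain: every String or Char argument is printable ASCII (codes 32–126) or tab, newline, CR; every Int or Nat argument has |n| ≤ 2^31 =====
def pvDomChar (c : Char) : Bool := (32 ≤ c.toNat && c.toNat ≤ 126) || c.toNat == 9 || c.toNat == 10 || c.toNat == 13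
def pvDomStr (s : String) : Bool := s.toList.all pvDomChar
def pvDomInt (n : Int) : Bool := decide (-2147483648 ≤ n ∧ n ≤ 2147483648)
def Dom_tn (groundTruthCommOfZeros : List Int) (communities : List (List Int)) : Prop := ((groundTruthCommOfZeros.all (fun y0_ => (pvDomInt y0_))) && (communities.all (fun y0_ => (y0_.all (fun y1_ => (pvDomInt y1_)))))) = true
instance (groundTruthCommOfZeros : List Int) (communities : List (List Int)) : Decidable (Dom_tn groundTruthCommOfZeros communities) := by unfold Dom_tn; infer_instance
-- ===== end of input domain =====

-- B replaces A's quadruple nested loop by closed-form row/column aggregates (same value, far less work).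

-- ===== PORT A =====
-- range(len(...)) is ported as List.range; every index the loops produce is in range,
-- so list[i] is ported as getD (exact here).
def tn (groundTruthCommOfZeros : List Int) (communities : List (List Int)) : Int :=
  -- counter0/counter1 are computed and never used, exactly as in the Python
  let _counters : List Int × List Int := communities.foldl
    (fun cs community =>
      let c := community.foldl
        (fun (c : Int × Int) i =>
          if groundTruthCommOfZeros.contains i then (c.1 + 1, c.2) else (c.1, c.2 + 1))
        (0, 0)
      (cs.1 ++ [c.1], cs.2 ++ [c.2]))
    ([], [])
  (List.range communities.length).foldl (fun tns i =>
    (List.range (communities.getD i []).length).foldl (fun tns j =>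
      let product := (communities.getD i []).getD j 0
      (List.range communities.length).foldl (fun tns x =>
        (List.range (communities.getD x []).length).foldl (fun tns y =>
          if x ≠ i ∧ y ≠ j ∧ x > i then tns + product * (communities.getD x []).getD y 0
          else tns)
          tns)
        tns)
      tns)
    0

-- ===== PORT B =====
-- literal port of Source B; sum(...) is the add-fold, max(lengths, default=0) is the max-fold over Nat lengths
def tn_alt (groundTruthCommOfZeros : List Int) (communities : List (List Int)) : Int :=
  let rowSums := communities.map (fun row => row.foldl (fun acc v => acc + v) 0)
  let total := rowSums.foldl (fun acc v => acc + v) 0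
  let pairSum := PySem.Int.floordiv
    (total * total - (rowSums.map (fun s => s * s)).foldl (fun acc v => acc + v) 0) 2
  let maxlen := (communities.map List.length).foldl max 0
  let dotPairs := (List.range maxlen).foldl (fun dp j =>
    let cs := communities.foldl
      (fun (cs : Int × Int) row =>
        if j < row.length then
          let v := row.getD j 0
          (cs.1 + v, cs.2 + v * v)
        else cs)
      (0, 0)
    dp + PySem.Int.floordiv (cs.1 * cs.1 - cs.2) 2) 0
  pairSum - dotPairs

-- ===== PRECONDITION & SPEC =====
def Spec_tn (groundTruthCommOfZeros : List Int) (communities : List (List Int)) (out : Int) : Prop := out = tn_alt groundTruthCommOfZeros communities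
instance (groundTruthCommOfZeros : List Int) (communities : List (List Int)) (out : Int) : Decidable (Spec_tn groundTruthCommOfZeros communities out) := by unfold Spec_tn; infer_instance

-- ===== CLAIM (what is proved, stated in full; the proofs are below) =====
def Claim_equal_tn : Prop := ∀ (groundTruthCommOfZeros : List Int) (communities : List (List Int)), Dom_tn groundTruthCommOfZeros communities → Spec_tn groundTruthCommOfZeros communities (tn groundTruthCommOfZeros communities)

-- ===== LEMMAS AND PROOFS =====

-- abbreviations about the input matrix
def rowL (cs : List (List Int)) (i : ℕ) : List Int := cs.getD i []
def aE (cs : List (List Int)) (i j : ℕ) : Int := (rowL cs i).getD j 0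
def SRow (cs : List (List Int)) (i : ℕ) : Int := ∑ j ∈ Finset.range (rowL cs i).length, aE cs i j
def colE (cs : List (List Int)) (j i : ℕ) : Int := if j < (rowL cs i).length then aE cs i j else 0
def DotMin (cs : List (List Int)) (i x : ℕ) : Int :=
  ∑ j ∈ Finset.range (min (rowL cs i).length (rowL cs x).length), aE cs i j * aE cs x j

-- a foldl over List.range whose body adds F k to the accumulator
theorem foldl_range_add (n : ℕ) (F : ℕ → Int) (f : Int → ℕ → Int)
    (hf : ∀ acc k, f acc k = acc + F k) (c : Int) :
    (List.range n).foldl f c = c + ∑ k ∈ Finset.range n, F k := by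
  induction n generalizing c with
  | zero => simp
  | succ m ih =>
      rw [List.range_succ, List.foldl_append, ih, Finset.sum_range_succ]
      simp [hf]; ring

-- plain running-sum loop
theorem foldl_id_add (l : List Int) (c : Int) :
    l.foldl (fun acc v => acc + v) c = c + l.sum := by
  induction l generalizing c with
  | nil => simp
  | cons a t ih => simp [ih]; ring

-- a list sum of a map as a Finset.range sum over getD
theorem map_sum_getD {α : Type} (l : List α) (f : α → Int) (d : α) :
    (l.map f).sum = ∑ i ∈ Finset.range l.length, f (l.getD i d) := by
  induction l with
  | nil => simp
  | cons a t ih =>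
      simp only [List.map_cons, List.sum_cons, List.length_cons, Finset.sum_range_succ']
      simp [ih, List.getD]
      ring

-- drop an if-guard by shrinking the range to the min
theorem sum_ite_min (g : ℕ → Int) (m l : ℕ) :
    ∑ j ∈ Finset.range m, (if j < l then g j else 0) = ∑ j ∈ Finset.range (min m l), g j := by
  have hsub : Finset.range (min m l) ⊆ Finset.range m := fun x hx =>
    Finset.mem_range.2 (lt_of_lt_of_le (Finset.mem_range.1 hx) (min_le_left m l))
  rw [← Finset.sum_subset hsub ?_]
  · exact Finset.sum_congr rfl (fun j hj =>
      if_pos (lt_of_lt_of_le (Finset.mem_range.1 hj) (min_le_right m l)))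
  · intro j hjm hjmin
    rw [if_neg]
    intro hjl
    exact hjmin (Finset.mem_range.2 (lt_min (Finset.mem_range.1 hjm) hjl))

-- square of a sum = sum of squares + twice the strictly-ordered pair sum
theorem sq_sum (n : ℕ) (f : ℕ → Int) :
    (∑ i ∈ Finset.range n, f i) * (∑ i ∈ Finset.range n, f i)
      = (∑ i ∈ Finset.range n, f i * f i)
        + 2 * ∑ i ∈ Finset.range n, ∑ x ∈ Finset.range n, (if i < x then f i * f x else 0) := by
  induction n with
  | zero => simp
  | succ m ih =>
      have hlast : (∑ x ∈ Finset.range (m+1), (if m < x then f m * f x else 0)) = 0 := by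
        apply Finset.sum_eq_zero
        intro x hx
        rw [if_neg]
        have := Finset.mem_range.1 hx
        omega
      have hsplit : (∑ i ∈ Finset.range m, ∑ x ∈ Finset.range (m+1), (if i < x then f i * f x else 0))
          = (∑ i ∈ Finset.range m, ∑ x ∈ Finset.range m, (if i < x then f i * f x else 0))
            + (∑ i ∈ Finset.range m, f i) * f m := by
        have h1 : ∀ i ∈ Finset.range m,
            (∑ x ∈ Finset.range (m+1), (if i < x then f i * f x else 0))
              = (∑ x ∈ Finset.range m, (if i < x then f i * f x else 0)) + f i * f m := by
          intro i hi
          rw [Finset.sum_range_succ, if_pos (Finset.mem_range.1 hi)]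
        rw [Finset.sum_congr rfl h1, Finset.sum_add_distrib, ← Finset.sum_mul]
      rw [Finset.sum_range_succ f m, Finset.sum_range_succ (fun i => f i * f i) m,
          Finset.sum_range_succ
            (fun i => ∑ x ∈ Finset.range (m+1), (if i < x then f i * f x else 0)) m,
          hlast, hsplit]
      linear_combination ih

-- Python (2*k) // 2 = k
theorem half_two (k : Int) : PySem.Int.floordiv (2 * k) 2 = k := by
  rw [PySem.Int.floordiv_eq_ediv_of_pos (by norm_num)]
  exact Int.mul_ediv_cancel_left k (by norm_num)

-- the per-column loop of B computes the column sum and the column sum of squares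
theorem foldl_col (l : List (List Int)) (j : ℕ) (c : Int × Int) :
    l.foldl
      (fun cs row =>
        if j < row.length then (cs.1 + row.getD j 0, cs.2 + row.getD j 0 * row.getD j 0) else cs)
      c
    = (c.1 + ∑ i ∈ Finset.range l.length, colE l j i,
       c.2 + ∑ i ∈ Finset.range l.length, colE l j i * colE l j i) := by
  induction l generalizing c with
  | nil => simp
  | cons a t ih =>
      have hshift : ∀ i : ℕ, colE (a :: t) j (i + 1) = colE t j i := by
        intro i; simp [colE, aE, rowL, List.getD]
      have hzero : colE (a :: t) j 0 = if j < a.length then a.getD j 0 else 0 := by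
        simp [colE, aE, rowL]
      simp only [List.foldl_cons, List.length_cons, Finset.sum_range_succ', hshift, hzero]
      rw [ih]
      by_cases h : j < a.length <;> simp [h] <;> constructor <;> ring

-- every row length is at most B's maxlen
theorem rowlen_le_maxlen (cs : List (List Int)) (i : ℕ) (hi : i < cs.length) :
    (rowL cs i).length ≤ (cs.map List.length).foldl max 0 := by
  have hmem : (rowL cs i).length ∈ cs.map List.length := by
    rw [rowL, List.getD_eq_getElem cs [] hi]
    exact List.mem_map.2 ⟨cs[i], List.getElem_mem hi, rfl⟩
  exact (PySem.List.le_foldl_max (cs.map List.length) 0).2 _ hmem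

-- a product of two guarded column entries
theorem colE_mul (cs : List (List Int)) (j i x : ℕ) :
    colE cs j i * colE cs j x
      = if j < min (rowL cs i).length (rowL cs x).length then aE cs i j * aE cs x j else 0 := by
  unfold colE
  by_cases h1 : j < (rowL cs i).length <;> by_cases h2 : j < (rowL cs x).length <;>
    simp [h1, h2]

-- per ordered pair: the column-by-column products sum to DotMin
theorem col_dot (cs : List (List Int)) (i x : ℕ) (hi : i < cs.length) :
    (∑ j ∈ Finset.range ((cs.map List.length).foldl max 0), colE cs j i * colE cs j x)
      = DotMin cs i x := by
  have h1 : ∀ j, colE cs j i * colE cs j x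
      = if j < min (rowL cs i).length (rowL cs x).length then aE cs i j * aE cs x j else 0 :=
    fun j => colE_mul cs j i x
  have hle : min (rowL cs i).length (rowL cs x).length ≤ (cs.map List.length).foldl max 0 :=
    le_trans (min_le_left _ _) (rowlen_le_maxlen cs i hi)
  rw [Finset.sum_congr rfl (fun j _ => h1 j), sum_ite_min, min_eq_right hle, DotMin]

-- A as a quadruple Finset sum
theorem tn_eq_sum (g : List Int) (cs : List (List Int)) :
    tn g cs = ∑ i ∈ Finset.range cs.length, ∑ j ∈ Finset.range (rowL cs i).length,
              ∑ x ∈ Finset.range cs.length, ∑ y ∈ Finset.range (rowL cs x).length,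
                (if x ≠ i ∧ y ≠ j ∧ i < x then aE cs i j * aE cs x y else 0) := by
  refine ((foldl_range_add _ _ _ (fun acc i => ?_) 0).trans (zero_add _))
  refine foldl_range_add _ _ _ (fun acc j => ?_) acc
  refine foldl_range_add _ _ _ (fun acc x => ?_) acc
  refine foldl_range_add _ _ _ (fun acc y => ?_) acc
  simp only [aE, rowL]
  split <;> simp

-- inner double sum for a fixed row pair
theorem inner4 (cs : List (List Int)) (i x : ℕ) :
    (∑ j ∈ Finset.range (rowL cs i).length, ∑ y ∈ Finset.range (rowL cs x).length,
        (if x ≠ i ∧ y ≠ j ∧ i < x then aE cs i j * aE cs x y else 0))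
      = if i < x then SRow cs i * SRow cs x - DotMin cs i x else 0 := by
  by_cases hix : i < x
  · have hne : x ≠ i := Nat.ne_of_gt hix
    have hsummand : ∀ j y, (if x ≠ i ∧ y ≠ j ∧ i < x then aE cs i j * aE cs x y else 0)
        = aE cs i j * aE cs x y - (if y = j then aE cs i j * aE cs x y else 0) := by
      intro j y
      by_cases hyj : y = j <;> simp [hne, hix, hyj]
    have hrow : ∀ j, (∑ y ∈ Finset.range (rowL cs x).length,
          (if x ≠ i ∧ y ≠ j ∧ i < x then aE cs i j * aE cs x y else 0))
        = aE cs i j * SRow cs x - (if j < (rowL cs x).length then aE cs i j * aE cs x j else 0) := by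
      intro j
      rw [Finset.sum_congr rfl (fun y _ => hsummand j y), Finset.sum_sub_distrib]
      congr 1
      · simp only [SRow]; rw [← Finset.mul_sum]
      · rw [Finset.sum_ite_eq' (Finset.range (rowL cs x).length) j
              (fun y => aE cs i j * aE cs x y)]
        simp [Finset.mem_range]
  
    rw [Finset.sum_congr rfl (fun j _ => hrow j), Finset.sum_sub_distrib, if_pos hix]
    congr 1
    · simp only [SRow]; rw [← Finset.sum_mul]
    · rw [sum_ite_min (fun j => aE cs i j * aE cs x j)]
      simp only [DotMin]
  · simp [hix]

-- B as two closed-form double sums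
theorem tn_alt_eq (g : List Int) (cs : List (List Int)) :
    tn_alt g cs
      = (∑ i ∈ Finset.range cs.length, ∑ x ∈ Finset.range cs.length,
            (if i < x then SRow cs i * SRow cs x else 0))
        - (∑ i ∈ Finset.range cs.length, ∑ x ∈ Finset.range cs.length,
            (if i < x then DotMin cs i x else 0)) := by
  have hrowsum : ∀ row : List Int, row.foldl (fun acc v => acc + v) 0 = row.sum := by
    intro row; rw [foldl_id_add]; ring
  have hS : ∀ i, (cs[i]?.getD []).sum = SRow cs i := by
    intro i
    rw [SRow]
    have := map_sum_getD (rowL cs i) (fun v => v) 0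
    simpa [aE, rowL] using this
  have htotal : (cs.map (fun row => row.foldl (fun acc v => acc + v) 0)).foldl
        (fun acc v => acc + v) 0 = ∑ i ∈ Finset.range cs.length, SRow cs i := by
    rw [foldl_id_add, zero_add]
    simp only [hrowsum]
    rw [map_sum_getD cs (fun row => row.sum) []]
    exact Finset.sum_congr rfl (fun i _ => hS i)
  have hsq : ((cs.map (fun row => row.foldl (fun acc v => acc + v) 0)).map
        (fun s => s * s)).foldl (fun acc v => acc + v) 0
      = ∑ i ∈ Finset.range cs.length, SRow cs i * SRow cs i := by
    rw [foldl_id_add, zero_add, List.map_map, map_sum_getD cs _ []]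
    exact Finset.sum_congr rfl (fun i _ => by simp [hrowsum, hS i])
  have hpair : PySem.Int.floordiv
        ((∑ i ∈ Finset.range cs.length, SRow cs i) * (∑ i ∈ Finset.range cs.length, SRow cs i)
          - ∑ i ∈ Finset.range cs.length, SRow cs i * SRow cs i) 2
      = ∑ i ∈ Finset.range cs.length, ∑ x ∈ Finset.range cs.length,
          (if i < x then SRow cs i * SRow cs x else 0) := by
    rw [show (∑ i ∈ Finset.range cs.length, SRow cs i) * (∑ i ∈ Finset.range cs.length, SRow cs i)
          - ∑ i ∈ Finset.range cs.length, SRow cs i * SRow cs i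
        = 2 * ∑ i ∈ Finset.range cs.length, ∑ x ∈ Finset.range cs.length,
            (if i < x then SRow cs i * SRow cs x else 0) by
      linear_combination sq_sum cs.length (SRow cs)]
    exact half_two _
  have hdot : (List.range ((cs.map List.length).foldl max 0)).foldl
      (fun dp j =>
        dp + PySem.Int.floordiv
          ((cs.foldl (fun (p : Int × Int) row =>
              if j < row.length then (p.1 + row.getD j 0, p.2 + row.getD j 0 * row.getD j 0)
              else p) (0, 0)).1
            * (cs.foldl (fun (p : Int × Int) row =>
              if j < row.length then (p.1 + row.getD j 0, p.2 + row.getD j 0 * row.getD j 0)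
              else p) (0, 0)).1
           - (cs.foldl (fun (p : Int × Int) row =>
              if j < row.length then (p.1 + row.getD j 0, p.2 + row.getD j 0 * row.getD j 0)
              else p) (0, 0)).2) 2) 0
      = ∑ i ∈ Finset.range cs.length, ∑ x ∈ Finset.range cs.length,
          (if i < x then DotMin cs i x else 0) := by
    rw [foldl_range_add _ (fun j => ∑ i ∈ Finset.range cs.length, ∑ x ∈ Finset.range cs.length,
          (if i < x then colE cs j i * colE cs j x else 0)) _ ?_ 0, zero_add]
    · rw [Finset.sum_comm]
      rw [Finset.sum_congr rfl (fun i _ => Finset.sum_comm)]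
      -- now : ∑ i, ∑ x, ∑ j, ite  = ∑ i, ∑ x, ite … DotMin
      refine Finset.sum_congr rfl (fun i hi => Finset.sum_congr rfl (fun x _ => ?_))
      by_cases hix : i < x
      · simp only [hix, if_true]
        rw [← col_dot cs i x (Finset.mem_range.1 hi)]
      · simp [hix]
    · intro acc j
      rw [foldl_col cs j (0, 0)]
      simp only [zero_add]
      congr 1
      rw [show (∑ i ∈ Finset.range cs.length, colE cs j i) * (∑ i ∈ Finset.range cs.length, colE cs j i)
            - ∑ i ∈ Finset.range cs.length, colE cs j i * colE cs j i
          = 2 * ∑ i ∈ Finset.range cs.length, ∑ x ∈ Finset.range cs.length,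
              (if i < x then colE cs j i * colE cs j x else 0) by
        linear_combination sq_sum cs.length (colE cs j)]
      exact half_two _
  show PySem.Int.floordiv _ 2 - _ = _
  rw [htotal, hsq, hpair, hdot]

-- ===== VERDICT (by name: the statement is the Claim_ definition above) =====
theorem tn_spec : Claim_equal_tn := by
  intro g cs _
  show tn g cs = tn_alt g cs
  rw [tn_eq_sum, tn_alt_eq]
  rw [Finset.sum_congr rfl (fun i _ => Finset.sum_comm)]
  rw [Finset.sum_congr rfl (fun i _ => Finset.sum_congr rfl (fun x _ => inner4 cs i x))]
  rw [← Finset.sum_sub_distrib]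
  refine Finset.sum_congr rfl (fun i _ => ?_)
  rw [← Finset.sum_sub_distrib]
  refine Finset.sum_congr rfl (fun x _ => ?_)
  by_cases hix : i < x <;> simp [hix]
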